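-- pv_equiv track=rewrite | github.com/DingyiYang/LongStoryEval | evaluation_codes/eval_with_api/api_eval_with_sum.py | get_excerpt
-- ===== SOURCE A (Python) =====
-- def get_excerpt(content, max_length=500):
--     t_content = []
--     para_length = 0
--     for i,t_line in enumerate(content):
--         if("chapter " in t_line.lower()):continue
--         t_len = len(content[i].split(" "))
--         para_length+=t_len
--         if(para_length>max_length):
--             break
--         t_content.append(content[i].replace("\n"," ").strip())
--     return "\n".join(t_content[:])
-- ===== SOURCE B (Python) =====
-- def get_excerpt(content, max_length=500):
--     kept = [line for line in content if "chapter " not in line.lower()]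
--     totals = []
--     total = 0
--     for line in kept:
--         total += len(line.split(" "))
--         totals.append(total)
--     cut = sum(1 for t in totals if t <= max_length)
--     return "\n".join(line.replace("\n", " ").strip() for line in kept[:cut])
-- ===== Notes on version B (the rewrite author's own statement) =====
-- stated objective: alternative
-- what changed: Replaces A's single counter-and-break loop by a pipeline: filter out chapter lines, build the cumulative word totals, count how many totals stay <= max_length, then take/clean/join that prefix.
import Mathlib
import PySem

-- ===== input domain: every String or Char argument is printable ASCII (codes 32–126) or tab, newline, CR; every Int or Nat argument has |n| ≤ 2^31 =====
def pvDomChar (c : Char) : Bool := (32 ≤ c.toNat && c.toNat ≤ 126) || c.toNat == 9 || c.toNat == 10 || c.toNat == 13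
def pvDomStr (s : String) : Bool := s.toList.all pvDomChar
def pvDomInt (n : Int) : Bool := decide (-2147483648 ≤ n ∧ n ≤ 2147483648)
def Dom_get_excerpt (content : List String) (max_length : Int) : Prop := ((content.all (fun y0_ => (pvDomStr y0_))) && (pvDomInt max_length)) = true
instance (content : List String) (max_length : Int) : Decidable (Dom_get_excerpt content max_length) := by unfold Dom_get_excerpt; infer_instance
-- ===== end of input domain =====

-- B replaces A's counter-and-break loop by a filter / cumulative-totals / count / take-clean-join pipeline (alternative decomposition, same cost).


-- ===== PORT A =====
-- A's loop: skip chapter lines, add the word count, break when the running total exceeds max_length, else append the cleaned line.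
def getExcerptLoopA (max_length : Int) : List String → List String → Int → List String
  | [], acc, _ => acc
  | t_line :: rest, acc, para_length =>
    if PySem.Str.isIn "chapter " (PySem.Str.lower t_line) then
      getExcerptLoopA max_length rest acc para_length
    else
      let t_len : Int := ((PySem.Chars.splitOn t_line.toList [' ']).length : Int)
      let para_length' := para_length + t_len
      if para_length' > max_length then acc
      else getExcerptLoopA max_length rest (acc ++ [PySem.Str.strip (PySem.Str.replace t_line "\n" " ")]) para_length'

def get_excerpt (content : List String) (max_length : Int) : String :=
  PySem.Str.join "\n" (getExcerptLoopA max_length content [] 0)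

-- ===== PORT B =====
-- B: filter out chapter lines, accumulate cumulative word totals, count how many stay ≤ max_length, take/clean/join that prefix.
def get_excerpt_alt (content : List String) (max_length : Int) : String :=
  let kept := content.filter (fun line => !(PySem.Str.isIn "chapter " (PySem.Str.lower line)))
  let totals := (kept.foldl (fun (p : List Int × Int) line =>
      let total := p.2 + ((PySem.Chars.splitOn line.toList [' ']).length : Int)
      (p.1 ++ [total], total)) ([], 0)).1
  let cut := totals.countP (fun t => t ≤ max_length)
  PySem.Str.join "\n" ((kept.take cut).map (fun line => PySem.Str.strip (PySem.Str.replace line "\n" " ")))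

-- ===== PRECONDITION & SPEC =====
def Spec_get_excerpt (content : List String) (max_length : Int) (out : String) : Prop := out = get_excerpt_alt content max_length
instance (content : List String) (max_length : Int) (out : String) : Decidable (Spec_get_excerpt content max_length out) := by unfold Spec_get_excerpt; infer_instance

-- ===== CLAIM (what is proved, stated in full; the proofs are below) =====
def Claim_equal_get_excerpt : Prop := ∀ (content : List String) (max_length : Int), Dom_get_excerpt content max_length → Spec_get_excerpt content max_length (get_excerpt content max_length)

-- ===== LEMMAS AND PROOFS =====

-- the common value: the prefix of cleaned kept lines whose running total stays ≤ max_length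
def pvPick (max_length : Int) : List String → Int → List String
  | [], _ => []
  | l :: ls, pl =>
    let t := pl + ((PySem.Chars.splitOn l.toList [' ']).length : Int)
    if t > max_length then []
    else PySem.Str.strip (PySem.Str.replace l "\n" " ") :: pvPick max_length ls t

-- cumulative totals starting from pl
def pvCums : Int → List String → List Int
  | _, [] => []
  | pl, l :: ls =>
    let t := pl + ((PySem.Chars.splitOn l.toList [' ']).length : Int)
    t :: pvCums t ls

theorem pvCums_ge (ls : List String) : ∀ (pl x : Int), x ∈ pvCums pl ls → pl ≤ x := by
  induction ls with
  | nil => intro pl x h; simp [pvCums] at h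
  | cons l ls ih =>
    intro pl x h
    simp only [pvCums, List.mem_cons] at h
    rcases h with h | h
    · omega
    · have := ih _ _ h; omega

theorem loopA_eq_pick (max_length : Int) (rest : List String) :
    ∀ (acc : List String) (pl : Int),
      getExcerptLoopA max_length rest acc pl =
        acc ++ pvPick max_length (rest.filter (fun line => !(PySem.Str.isIn "chapter " (PySem.Str.lower line)))) pl := by
  induction rest with
  | nil => intro acc pl; simp [getExcerptLoopA, pvPick]
  | cons l ls ih =>
    intro acc pl
    by_cases h : PySem.Str.isIn "chapter " (PySem.Str.lower l) = true
    · simp at h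
      simp [getExcerptLoopA, h, ih]
    · simp at h
      by_cases h2 : pl + ((PySem.Chars.splitOn l.toList [' ']).length : Int) > max_length
      · simp [getExcerptLoopA, pvPick, h, h2]
      · simp [getExcerptLoopA, pvPick, h, h2, ih, List.append_assoc]

theorem foldl_cums (kept : List String) :
    ∀ (acc : List Int) (pl : Int),
      (kept.foldl (fun (p : List Int × Int) line =>
          (p.1 ++ [p.2 + ((PySem.Chars.splitOn line.toList [' ']).length : Int)],
           p.2 + ((PySem.Chars.splitOn line.toList [' ']).length : Int))) (acc, pl)).1 =
        acc ++ pvCums pl kept := by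
  induction kept with
  | nil => intro acc pl; simp [pvCums]
  | cons l ls ih => intro acc pl; simp [List.foldl_cons, pvCums, ih, List.append_assoc]

theorem take_count_eq_pick (max_length : Int) (kept : List String) :
    ∀ (pl : Int),
      (kept.take ((pvCums pl kept).countP (fun t => t ≤ max_length))).map
          (fun line => PySem.Str.strip (PySem.Str.replace line "\n" " ")) =
        pvPick max_length kept pl := by
  induction kept with
  | nil => intro pl; simp [pvCums, pvPick]
  | cons l ls ih =>
    intro pl
    set t := pl + ((PySem.Chars.splitOn l.toList [' ']).length : Int) with ht
    by_cases h : t > max_length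
    · have hall : List.countP (fun x => decide (x ≤ max_length)) (pvCums t ls) = 0 := by
        rw [List.countP_eq_zero]
        intro x hx
        have := pvCums_ge ls t x hx
        simp only [decide_eq_true_eq]
        omega
      have hd : (decide (t ≤ max_length)) = false := by
        simp only [decide_eq_false_iff_not]
        omega
      simp only [pvCums, pvPick, ← ht]
      rw [if_pos h]
      simp [hall, hd]
    · have hd : (decide (t ≤ max_length)) = true := by
        simp only [decide_eq_true_eq]
        omega
      simp only [pvCums, pvPick, ← ht]
      rw [if_neg h]
      simp [hd]
      simpa using ih t

-- ===== VERDICT (by name: the statement is the Claim_ definition above) =====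
theorem get_excerpt_spec : Claim_equal_get_excerpt := by
  intro content max_length _
  unfold Spec_get_excerpt
  simp only [get_excerpt, get_excerpt_alt]
  rw [loopA_eq_pick, foldl_cums, List.nil_append, List.nil_append, take_count_eq_pick]
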